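-- pv_equiv track=rewrite | github.com/tjd229/Algorithm | GCJ/Roaring Years.py | roar
-- ===== SOURCE A (Python) =====
-- def fact(x, v):
--     while x>0:
--         v.append(x%10)
--         x//=10
--     v.reverse()
--
-- def roar(base,sz):
--     v=[]
--     coin=0
--     while coin<2 or len(v)<sz:
--         sub=[]
--         fact(base,sub)
--         v.extend(sub)
--         base+=1
--         coin+=1
--
--     z=0
--     for x in v:
--         z=z*10+x
--     return z
-- ===== SOURCE B (Python) =====
-- def roar(base, sz):
--     # Running-integer rebuild: append each year's digits arithmetically
--     # (z = z * 10**digits + n) instead of materialising a digit list.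
--     z = 0
--     d = 0
--     coin = 0
--     n = base
--     while coin < 2 or d < sz:
--         if n > 0:
--             p = 1
--             while p <= n:
--                 p *= 10
--                 d += 1
--             z = z * p + n
--         n += 1
--         coin += 1
--     return z
-- ===== Notes on version B (the rewrite author's own statement) =====
-- stated objective: alternative
-- what changed: B keeps a running integer z = z*10**digits + n with a digit counter instead of building a flat digit list via per-number digit extraction and reconstructing the number digit-by-digit with Horner's rule; no list is ever materialised.
import Mathlib
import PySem

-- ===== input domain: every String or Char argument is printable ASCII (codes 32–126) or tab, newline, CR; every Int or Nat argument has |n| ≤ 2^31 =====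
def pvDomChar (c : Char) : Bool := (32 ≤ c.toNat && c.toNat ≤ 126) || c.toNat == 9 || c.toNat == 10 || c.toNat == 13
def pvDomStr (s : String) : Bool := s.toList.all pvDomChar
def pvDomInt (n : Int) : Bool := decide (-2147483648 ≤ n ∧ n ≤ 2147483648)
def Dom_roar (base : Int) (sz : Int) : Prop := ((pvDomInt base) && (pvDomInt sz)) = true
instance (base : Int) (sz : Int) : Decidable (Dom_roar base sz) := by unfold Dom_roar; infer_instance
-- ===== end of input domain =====

-- B replaces A's digit-list build + Horner rebuild by one running integer with a digit counter (alternative decomposition; same cost).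
-- Loops are ported with an explicit fuel equal to their (informal) iteration bound — a totality device only, never reached.

-- ===== PORT A =====
-- fact's while loop: append x%10, x //= 10  (fuel ≥ the digit count of x; x.toNat suffices)
def factLoop (fuel : Nat) (x : Int) (v : List Int) : List Int :=
  match fuel with
  | 0 => v
  | f + 1 =>
    if 0 < x then factLoop f (PySem.Int.floordiv x 10) (v ++ [PySem.Int.mod x 10]) else v

def fact (x : Int) : List Int := (factLoop x.toNat x []).reverse

-- roar's while loop: state (v, coin, base); each pass raises coin, raises base, extends v,
-- so 2 + (1-base)⁺ + sz⁺ passes always suffice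
def roarLoop (fuel : Nat) (v : List Int) (coin : Int) (base : Int) (sz : Int) : List Int :=
  match fuel with
  | 0 => v
  | f + 1 =>
    if coin < 2 ∨ (v.length : Int) < sz then
      roarLoop f (v ++ fact base) (coin + 1) (base + 1) sz
    else v

def roar (base : Int) (sz : Int) : Int :=
  (roarLoop (2 + (1 - base).toNat + sz.toNat) [] 0 base sz).foldl (fun z x => z * 10 + x) 0

-- ===== PORT B =====
-- B's inner while loop: p *= 10; d += 1 while p <= n  (starts at p = 1; n.toNat passes suffice)
def powLoop (fuel : Nat) (p : Int) (d : Int) (n : Int) : Int × Int :=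
  match fuel with
  | 0 => (p, d)
  | f + 1 =>
    if 0 < p ∧ p ≤ n then powLoop f (p * 10) (d + 1) n else (p, d)

-- B's outer while loop: state (z, d, coin, n); same iteration bound as A's loop
def roarAltLoop (fuel : Nat) (z : Int) (d : Int) (coin : Int) (n : Int) (sz : Int) : Int :=
  match fuel with
  | 0 => z
  | f + 1 =>
    if coin < 2 ∨ d < sz then
      if 0 < n then
        let pd := powLoop n.toNat 1 d n
        roarAltLoop f (z * pd.1 + n) pd.2 (coin + 1) (n + 1) sz
      else
        roarAltLoop f z d (coin + 1) (n + 1) sz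
    else z

def roar_alt (base : Int) (sz : Int) : Int :=
  roarAltLoop (2 + (1 - base).toNat + sz.toNat) 0 0 0 base sz

-- ===== PRECONDITION & SPEC =====
def Spec_roar (base : Int) (sz : Int) (out : Int) : Prop := out = roar_alt base sz
instance (base : Int) (sz : Int) (out : Int) : Decidable (Spec_roar base sz out) := by unfold Spec_roar; infer_instance

-- ===== CLAIM (what is proved, stated in full; the proofs are below) =====
def Claim_equal_roar : Prop := ∀ (base : Int) (sz : Int), Dom_roar base sz → Spec_roar base sz (roar base sz)

-- ===== LEMMAS AND PROOFS =====

-- factLoop's accumulator only collects output: it can be split off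
theorem factLoop_append : ∀ (f : Nat) (x : Int) (v : List Int),
    factLoop f x v = v ++ factLoop f x [] := by
  intro f
  induction f with
  | zero => intro x v; simp [factLoop]
  | succ f ih =>
    intro x v
    by_cases hx : 0 < x
    · simp only [factLoop, if_pos hx, List.nil_append]
      rw [ih (PySem.Int.floordiv x 10) (v ++ [PySem.Int.mod x 10]),
          ih (PySem.Int.floordiv x 10) ([PySem.Int.mod x 10])]
      simp
    · simp [factLoop, if_neg hx]

-- factLoop ignores fuel beyond x.toNat
theorem factLoop_fuel : ∀ (f1 : Nat), ∀ (f2 : Nat) (x : Int) (v : List Int),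
    x.toNat ≤ f1 → x.toNat ≤ f2 → factLoop f1 x v = factLoop f2 x v := by
  intro f1
  induction f1 with
  | zero =>
    intro f2 x v h1 _
    have hx : ¬ 0 < x := by omega
    cases f2 with
    | zero => rfl
    | succ f2 => simp [factLoop, if_neg hx]
  | succ f1 ih =>
    intro f2 x v h1 h2
    by_cases hx : 0 < x
    · have hq : PySem.Int.floordiv x 10 = x / 10 := PySem.Int.floordiv_eq_ediv_of_pos (by norm_num)
      cases f2 with
      | zero => omega
      | succ f2 =>
        simp only [factLoop, if_pos hx]
        exact ih f2 (PySem.Int.floordiv x 10) _ (by omega) (by omega)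
    · cases f2 with
      | zero => simp [factLoop, if_neg hx]
      | succ f2 => simp [factLoop, if_neg hx]

theorem fact_nonpos (x : Int) (hx : ¬ 0 < x) : fact x = [] := by
  unfold fact
  have : x.toNat = 0 := by omega
  rw [this]
  rfl

theorem fact_cons (x : Int) (hx : 0 < x) :
    fact x = fact (PySem.Int.floordiv x 10) ++ [PySem.Int.mod x 10] := by
  have hq : PySem.Int.floordiv x 10 = x / 10 := PySem.Int.floordiv_eq_ediv_of_pos (by norm_num)
  unfold fact
  obtain ⟨f, hf⟩ : ∃ f, x.toNat = f + 1 := ⟨x.toNat - 1, by omega⟩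
  rw [hf]
  simp only [factLoop, if_pos hx, List.nil_append]
  rw [factLoop_fuel f (PySem.Int.floordiv x 10).toNat (PySem.Int.floordiv x 10)
        ([PySem.Int.mod x 10]) (by omega) (by omega),
      factLoop_append _ (PySem.Int.floordiv x 10) ([PySem.Int.mod x 10])]
  simp

-- folding A's Horner step over the digits of x appends x arithmetically
theorem fact_foldl : ∀ (k : Nat) (x : Int), x.toNat = k → 0 < x → ∀ a : Int,
    (fact x).foldl (fun z y => z * 10 + y) a = a * 10 ^ (fact x).length + x := by
  intro k
  induction k using Nat.strong_induction_on with
  | _ k IH =>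
    intro x hk hx a
    have h1 : PySem.Int.floordiv x 10 = x / 10 := PySem.Int.floordiv_eq_ediv_of_pos (by norm_num)
    have hdm : PySem.Int.floordiv x 10 * 10 + PySem.Int.mod x 10 = x :=
      PySem.Int.floordiv_mul_add_mod x 10
    rw [fact_cons x hx, List.foldl_append]
    by_cases hq : 0 < PySem.Int.floordiv x 10
    · have hlt : (PySem.Int.floordiv x 10).toNat < k := by omega
      rw [IH _ hlt _ rfl hq a]
      simp only [List.length_append, List.length_cons, List.length_nil, List.foldl_cons,
        List.foldl_nil, pow_succ]
      nlinarith [hdm]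
    · have hz : fact (PySem.Int.floordiv x 10) = [] := fact_nonpos _ hq
      rw [hz]
      simp only [List.nil_append, List.length_cons, List.length_nil, List.foldl_cons,
        List.foldl_nil]
      omega

-- dividing the target by 10 removes one factor of 10 from powLoop's run (same fuel, lockstep)
theorem powLoop_shift : ∀ (f : Nat) (p d n : Int), 0 < p →
    powLoop f (p * 10) (d + 1) n =
      ((powLoop f p d (PySem.Int.floordiv n 10)).1 * 10,
       (powLoop f p d (PySem.Int.floordiv n 10)).2 + 1) := by
  intro f
  induction f with
  | zero => intro p d n hp; rfl
  | succ f ih =>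
    intro p d n hp
    have hiff : p ≤ PySem.Int.floordiv n 10 ↔ p * 10 ≤ n :=
      PySem.Int.le_floordiv_iff_mul_le (by norm_num)
    by_cases hc : p ≤ PySem.Int.floordiv n 10
    · have hc2 : p * 10 ≤ n := hiff.mp hc
      simp only [powLoop, if_pos (show 0 < p * 10 ∧ p * 10 ≤ n from ⟨by omega, hc2⟩),
        if_pos (show 0 < p ∧ p ≤ PySem.Int.floordiv n 10 from ⟨hp, hc⟩)]
      exact ih (p * 10) (d + 1) n (by omega)
    · have hc2 : ¬ (0 < p * 10 ∧ p * 10 ≤ n) := fun h => hc (hiff.mpr h.2)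
      simp only [powLoop, if_neg hc2,
        if_neg (show ¬ (0 < p ∧ p ≤ PySem.Int.floordiv n 10) from fun h => hc h.2)]

-- B's inner loop computes 10^(digit count of n) and advances d by that count
theorem powLoop_fact : ∀ (k : Nat) (n : Int), n.toNat = k → 0 < n → ∀ (d : Int) (f : Nat),
    n.toNat ≤ f → powLoop f 1 d n = (10 ^ (fact n).length, d + (fact n).length) := by
  intro k
  induction k using Nat.strong_induction_on with
  | _ k IH =>
    intro n hk hn d f hf
    have h1 : PySem.Int.floordiv n 10 = n / 10 := PySem.Int.floordiv_eq_ediv_of_pos (by norm_num)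
    have hlen : (fact n).length = (fact (PySem.Int.floordiv n 10)).length + 1 := by
      rw [fact_cons n hn]; simp
    obtain ⟨f', hf'⟩ : ∃ f', f = f' + 1 := ⟨f - 1, by omega⟩
    subst hf'
    simp only [powLoop, if_pos (show 0 < (1:Int) ∧ (1:Int) ≤ n from ⟨by omega, by omega⟩)]
    rw [show (1 : Int) * 10 = (1 : Int) * 10 from rfl, powLoop_shift f' 1 d n (by omega)]
    by_cases hq : 0 < PySem.Int.floordiv n 10
    · have hlt : (PySem.Int.floordiv n 10).toNat < k := by omega
      rw [IH _ hlt _ rfl hq d f' (by omega), hlen]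
      rw [Prod.mk.injEq]
      refine ⟨by rw [pow_succ], by push_cast; ring⟩
    · have hq0 : PySem.Int.floordiv n 10 = 0 := by omega
      have hz : fact (PySem.Int.floordiv n 10) = [] := fact_nonpos _ hq
      have hstop : ∀ g : Nat, powLoop g 1 d (PySem.Int.floordiv n 10) = (1, d) := by
        intro g
        cases g with
        | zero => rfl
        | succ g =>
          simp only [powLoop]
          rw [if_neg (show ¬ (0 < (1:Int) ∧ (1:Int) ≤ PySem.Int.floordiv n 10) by omega)]
      rw [hstop f', hlen, hz]
      simp

-- the two outer loops run in lockstep on the same fuel: A's (v, coin, base) corresponds to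
-- B's (foldl v, |v|, coin, n)
theorem roarLoop_eq_alt : ∀ (f : Nat) (v : List Int) (coin base sz z d : Int),
    z = v.foldl (fun a y => a * 10 + y) 0 → d = (v.length : Int) →
    (roarLoop f v coin base sz).foldl (fun a y => a * 10 + y) 0 =
      roarAltLoop f z d coin base sz := by
  intro f
  induction f with
  | zero => intro v coin base sz z d hz hd; exact hz.symm
  | succ f ih =>
    intro v coin base sz z d hz hd
    by_cases hcond : coin < 2 ∨ (v.length : Int) < sz
    · simp only [roarLoop, if_pos hcond, roarAltLoop,
        if_pos (show coin < 2 ∨ d < sz by omega)]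
      by_cases hb : 0 < base
      · rw [if_pos hb]
        have hpl := powLoop_fact base.toNat base rfl hb d base.toNat (by omega)
        simp only [hpl]
        apply ih
        · rw [List.foldl_append, ← hz, fact_foldl base.toNat base rfl hb z]
        · simp only [List.length_append]; push_cast; omega
      · rw [if_neg hb]
        have hfe : fact base = [] := fact_nonpos base hb
        rw [hfe, List.append_nil]
        exact ih v (coin + 1) (base + 1) sz z d hz hd
    · simp only [roarLoop, if_neg hcond, roarAltLoop,
        if_neg (show ¬ (coin < 2 ∨ d < sz) by omega)]
      exact hz.symm

-- ===== VERDICT (by name: the statement is the Claim_ definition above) =====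
theorem roar_spec : Claim_equal_roar := by
  intro base sz _
  unfold Spec_roar roar roar_alt
  exact roarLoop_eq_alt (2 + (1 - base).toNat + sz.toNat) [] 0 base sz 0 0 rfl rfl
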